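-- pv_equiv track=rewrite | github.com/MartinCampbell1/quorum | gateway.py | _strip_mcp_sections_from_toml
-- ===== SOURCE A (Python) =====
-- def _strip_mcp_sections_from_toml(raw_toml: str) -> str:
--     """Remove persisted MCP sections so a temp CODEX_HOME starts with a clean server registry."""
--     output: list[str] = []
--     skipping = False
--     for line in raw_toml.splitlines():
--         stripped = line.strip()
--         if stripped.startswith("[") and stripped.endswith("]"):
--             skipping = stripped.startswith("[mcp_servers.")
--             if not skipping:
--                 output.append(line)
--             continue
--         if skipping:
--             continue
--         output.append(line)
--     rendered = "\n".join(output).strip()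
--     return f"{rendered}\n" if rendered else 'cli_auth_credentials_store = "file"\n'
-- ===== SOURCE B (Python) =====
-- def _is_header(line):
--     s = line.strip()
--     return s.startswith("[") and s.endswith("]")
--
--
-- def _is_mcp_header(h):
--     return h.strip().startswith("[mcp_servers.")
--
--
-- def _strip_mcp_sections_from_toml(raw_toml: str) -> str:
--     """Partition the lines into sections, drop the [mcp_servers.*] groups, re-join."""
--     groups = [(None, [])]
--     for line in raw_toml.splitlines():
--         if _is_header(line):
--             groups.append((line, []))
--         else:
--             groups[-1][1].append(line)
--     lines = []
--     for header, body in groups: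
--         if header is not None:
--             if _is_mcp_header(header):
--                 continue
--             lines.append(header)
--         lines.extend(body)
--     rendered = "\n".join(lines).strip()
--     return f"{rendered}\n" if rendered else 'cli_auth_credentials_store = "file"\n'
-- ===== Notes on version B (the rewrite author's own statement) =====
-- stated objective: alternative
-- what changed: Replaces the skipping-flag state machine with a group-then-filter decomposition: lines are first partitioned into a preamble and header-led sections, then whole [mcp_servers.*] groups are dropped and the rest flattened back.
import Mathlib
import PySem

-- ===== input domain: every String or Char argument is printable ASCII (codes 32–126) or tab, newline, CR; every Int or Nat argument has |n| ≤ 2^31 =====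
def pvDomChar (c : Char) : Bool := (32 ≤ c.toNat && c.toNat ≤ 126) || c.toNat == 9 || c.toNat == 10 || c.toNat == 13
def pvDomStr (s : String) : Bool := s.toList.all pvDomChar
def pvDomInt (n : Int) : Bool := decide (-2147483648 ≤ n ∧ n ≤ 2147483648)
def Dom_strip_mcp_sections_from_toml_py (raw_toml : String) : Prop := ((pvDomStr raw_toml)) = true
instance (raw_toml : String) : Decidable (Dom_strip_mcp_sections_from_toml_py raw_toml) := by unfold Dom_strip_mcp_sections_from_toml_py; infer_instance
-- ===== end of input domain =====

-- B replaces A's skipping-flag state machine with a group-then-filter decomposition (alternative, same cost).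

-- ===== PORT A =====
-- A's loop body: state = (output, skipping)
def pvStepA (st : List String × Bool) (line : String) : List String × Bool :=
  let stripped := PySem.Str.strip line
  if PySem.Str.startswith stripped "[" && PySem.Str.endswith stripped "]" then
    let skipping := PySem.Str.startswith stripped "[mcp_servers."
    (if skipping then st.1 else st.1 ++ [line], skipping)
  else if st.2 then st
  else (st.1 ++ [line], st.2)

def strip_mcp_sections_from_toml_py (raw_toml : String) : String :=
  let st := (PySem.Str.splitlines raw_toml).foldl pvStepA ([], false)
  let rendered := PySem.Str.strip (PySem.Str.join "\n" st.1)
  if rendered = "" then "cli_auth_credentials_store = \"file\"\n"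
  else rendered ++ "\n"

-- ===== PORT B =====
def pvIsHeader (line : String) : Bool :=
  let s := PySem.Str.strip line
  PySem.Str.startswith s "[" && PySem.Str.endswith s "]"

def pvIsMcpHeader (h : String) : Bool :=
  PySem.Str.startswith (PySem.Str.strip h) "[mcp_servers."

-- B's grouping loop: state = (finished groups, current (= last) group); a group is (optional header, body)
def pvStepB (st : List (Option String × List String) × (Option String × List String))
    (line : String) : List (Option String × List String) × (Option String × List String) :=
  if pvIsHeader line then (st.1 ++ [st.2], (some line, []))
  else (st.1, (st.2.1, st.2.2 ++ [line]))

def strip_mcp_sections_from_toml_py_alt (raw_toml : String) : String :=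
  let st := (PySem.Str.splitlines raw_toml).foldl pvStepB ([], (none, []))
  let groups := st.1 ++ [st.2]
  let lines := groups.foldl
    (fun acc g =>
      match g.1 with
      | some h => if pvIsMcpHeader h then acc else acc ++ [h] ++ g.2
      | none => acc ++ g.2) []
  let rendered := PySem.Str.strip (PySem.Str.join "\n" lines)
  if rendered = "" then "cli_auth_credentials_store = \"file\"\n"
  else rendered ++ "\n"

-- ===== PRECONDITION & SPEC =====
def Spec_strip_mcp_sections_from_toml_py (raw_toml : String) (out : String) : Prop := out = strip_mcp_sections_from_toml_py_alt raw_toml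
instance (raw_toml : String) (out : String) : Decidable (Spec_strip_mcp_sections_from_toml_py raw_toml out) := by unfold Spec_strip_mcp_sections_from_toml_py; infer_instance

-- ===== CLAIM (what is proved, stated in full; the proofs are below) =====
def Claim_equal_strip_mcp_sections_from_toml_py : Prop := ∀ (raw_toml : String), Dom_strip_mcp_sections_from_toml_py raw_toml → Spec_strip_mcp_sections_from_toml_py raw_toml (strip_mcp_sections_from_toml_py raw_toml)

-- ===== LEMMAS AND PROOFS =====

-- the lines a finished group contributes to B's output
def pvRenderGroup (g : Option String × List String) : List String :=
  match g.1 with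
  | some h => if pvIsMcpHeader h then [] else h :: g.2
  | none => g.2

-- A's skipping flag as a function of B's current group
def pvSkipOf (g : Option String × List String) : Bool :=
  match g.1 with
  | some h => pvIsMcpHeader h
  | none => false

lemma pv_loop_eq (lines : List String) :
    ∀ (done : List (Option String × List String)) (cur : Option String × List String),
    lines.foldl pvStepA (done.flatMap pvRenderGroup ++ pvRenderGroup cur, pvSkipOf cur)
      = (((lines.foldl pvStepB (done, cur)).1 ++ [(lines.foldl pvStepB (done, cur)).2]).flatMap
           pvRenderGroup,
         pvSkipOf (lines.foldl pvStepB (done, cur)).2) := by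
  induction lines with
  | nil => intro done cur; simp [pvRenderGroup]
  | cons line rest ih =>
    intro done cur
    simp only [List.foldl_cons]
    by_cases hh : pvIsHeader line
    · have hA : pvStepA (done.flatMap pvRenderGroup ++ pvRenderGroup cur, pvSkipOf cur) line
          = ((done ++ [cur]).flatMap pvRenderGroup ++ pvRenderGroup (some line, []),
             pvSkipOf ((some line, []) : Option String × List String)) := by
        simp only [pvStepA, pvIsHeader] at hh ⊢
        rw [hh]
        by_cases hm : pvIsMcpHeader line
        · simp only [pvIsMcpHeader] at hm
          simp at hm
          simp [pvRenderGroup, pvSkipOf, pvIsMcpHeader, hm]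
        · simp only [pvIsMcpHeader] at hm
          simp at hm
          simp [pvRenderGroup, pvSkipOf, pvIsMcpHeader, hm]
      have hB : pvStepB (done, cur) line = (done ++ [cur], (some line, [])) := by
        simp [pvStepB, hh]
      rw [hA, hB, ih]
    · have hB : pvStepB (done, cur) line = (done, (cur.1, cur.2 ++ [line])) := by
        simp [pvStepB, hh]
      have hA : pvStepA (done.flatMap pvRenderGroup ++ pvRenderGroup cur, pvSkipOf cur) line
          = (done.flatMap pvRenderGroup ++ pvRenderGroup (cur.1, cur.2 ++ [line]),
             pvSkipOf (cur.1, cur.2 ++ [line])) := by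
        simp only [pvStepA, pvIsHeader] at hh ⊢
        rw [Bool.not_eq_true] at hh
        rw [hh]
        match hcur : cur.1 with
        | some h =>
          by_cases hm : pvIsMcpHeader h
          · simp [pvRenderGroup, pvSkipOf, hcur, hm]
          · simp [pvRenderGroup, pvSkipOf, hcur, hm]
        | none => simp [pvRenderGroup, pvSkipOf, hcur]
      rw [hA, hB, ih]

lemma pv_render_fold (gs : List (Option String × List String)) (acc : List String) :
    gs.foldl
      (fun acc g =>
        match g.1 with
        | some h => if pvIsMcpHeader h then acc else acc ++ [h] ++ g.2
        | none => acc ++ g.2) acc = acc ++ gs.flatMap pvRenderGroup := by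
  have h := PySem.List.foldl_append_eq_flatMap (g := pvRenderGroup) (l := gs) (acc := acc)
  rw [← h]
  apply PySem.List.foldl_congr_mem
  intro a g _
  match hg : g.1 with
  | some h' =>
    by_cases hm : pvIsMcpHeader h'
    · simp [pvRenderGroup, hg, hm]
    · simp [pvRenderGroup, hg, hm]
  | none => simp [pvRenderGroup, hg]

lemma pv_output_eq (raw_toml : String) :
    ((PySem.Str.splitlines raw_toml).foldl pvStepA ([], false)).1
      = (((PySem.Str.splitlines raw_toml).foldl pvStepB ([], (none, []))).1
          ++ [((PySem.Str.splitlines raw_toml).foldl pvStepB ([], (none, []))).2]).foldl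
          (fun acc g =>
            match g.1 with
            | some h => if pvIsMcpHeader h then acc else acc ++ [h] ++ g.2
            | none => acc ++ g.2) [] := by
  have h := pv_loop_eq (PySem.Str.splitlines raw_toml) [] (none, [])
  have hinit : (([], false) : List String × Bool)
      = (([] : List (Option String × List String)).flatMap pvRenderGroup
          ++ pvRenderGroup ((none, []) : Option String × List String),
         pvSkipOf ((none, []) : Option String × List String)) := by
    simp [pvRenderGroup, pvSkipOf]
  rw [hinit, h, pv_render_fold]
  simp

-- ===== VERDICT (by name: the statement is the Claim_ definition above) =====
theorem strip_mcp_sections_from_toml_py_spec : Claim_equal_strip_mcp_sections_from_toml_py := by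
  intro raw_toml _
  unfold Spec_strip_mcp_sections_from_toml_py
  unfold strip_mcp_sections_from_toml_py strip_mcp_sections_from_toml_py_alt
  simp only [pv_output_eq raw_toml]
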